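-- pv_equiv track=rewrite | github.com/JaydenYL/Practice | INFO1110/reader.py | special_function
-- ===== SOURCE A (Python) =====
-- def special_function(n):
-- 	num_ls = [2, 1]
-- 	r_ls = []
-- 	i, j = 0, 1
-- 	while i < n:
-- 		r_ls.append(j)
-- 		j += num_ls[i % 2]
-- 		i += 1
-- 	return r_ls
-- ===== SOURCE B (Python) =====
-- def special_function(n):
--     return [1 + (3 * i + 1) // 2 for i in range(n)]
-- ===== Notes on version B (the rewrite author's own statement) =====
-- stated objective: simpler
-- what changed: Replaces the accumulating while-loop with a running sum and a modulo-indexed increment list by a one-line list comprehension computing each value directly from its index via a closed-form floor-division formula.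
import Mathlib
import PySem

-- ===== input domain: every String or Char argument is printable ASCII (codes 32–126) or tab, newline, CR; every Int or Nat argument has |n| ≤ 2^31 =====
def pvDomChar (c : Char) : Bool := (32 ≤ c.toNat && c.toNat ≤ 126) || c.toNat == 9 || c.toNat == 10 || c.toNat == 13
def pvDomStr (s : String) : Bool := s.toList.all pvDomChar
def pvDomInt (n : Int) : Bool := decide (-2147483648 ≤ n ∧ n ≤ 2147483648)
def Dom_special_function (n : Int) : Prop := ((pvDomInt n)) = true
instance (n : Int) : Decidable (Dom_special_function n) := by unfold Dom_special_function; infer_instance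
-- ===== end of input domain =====

-- B replaces A's accumulating while-loop by a closed-form per-index formula over range(n) (objective: simpler).


-- ===== PORT A =====
-- while i < n: r_ls.append(j); j += num_ls[i % 2]; i += 1
def special_function_loop (n i j : Int) (acc : List Int) : List Int :=
  if _h : i < n then
    special_function_loop n (i + 1) (j + PySem.List.pyGetD [2, 1] (PySem.Int.mod i 2) 0) (acc ++ [j])
  else acc
termination_by (n - i).toNat
decreasing_by omega

def special_function (n : Int) : List Int :=
  special_function_loop n 0 1 []

-- ===== PORT B =====
-- [1 + (3 * i + 1) // 2 for i in range(n)]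
def special_function_alt (n : Int) : List Int :=
  (PySem.List.pyRange 0 n 1).map (fun i => 1 + PySem.Int.floordiv (3 * i + 1) 2)

-- ===== PRECONDITION & SPEC =====
def Spec_special_function (n : Int) (out : List Int) : Prop := out = special_function_alt n
instance (n : Int) (out : List Int) : Decidable (Spec_special_function n out) := by unfold Spec_special_function; infer_instance

-- ===== CLAIM (what is proved, stated in full; the proofs are below) =====
def Claim_equal_special_function : Prop := ∀ (n : Int), Dom_special_function n → Spec_special_function n (special_function n)

-- ===== LEMMAS AND PROOFS =====
def pvF (i : Int) : Int := 1 + PySem.Int.floordiv (3 * i + 1) 2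

lemma pvF_step (i : Int) (hi : 0 ≤ i) :
    pvF (i + 1) = pvF i + PySem.List.pyGetD [2, 1] (PySem.Int.mod i 2) 0 := by
  have h2 : (0 : Int) < 2 := by omega
  have hm := PySem.Int.mod_eq_emod_of_pos (a := i) h2
  have hd := PySem.Int.floordiv_eq_ediv_of_pos (a := 3 * i + 1) h2
  have hd' := PySem.Int.floordiv_eq_ediv_of_pos (a := 3 * (i + 1) + 1) h2
  rcases Int.emod_two_eq_zero_or_one i with h | h <;>
    simp [pvF, hd, hd', h, PySem.List.pyGetD] <;> omega

lemma loop_eq (n : Int) : ∀ (k : Nat) (i : Int), 0 ≤ i → (n - i).toNat = k →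
    ∀ acc : List Int, special_function_loop n i (pvF i) acc =
      acc ++ (PySem.List.pyRange i n 1).map pvF := by
  intro k
  induction k with
  | zero =>
    intro i hi hk acc
    have hni : ¬ i < n := by omega
    rw [special_function_loop, PySem.List.pyRange_one]
    have : (n - i).toNat = 0 := by omega
    simp [hni, this]
  | succ k ih =>
    intro i hi hk acc
    have hin : i < n := by omega
    rw [special_function_loop]
    simp only [hin, dif_pos]
    rw [← pvF_step i hi, ih (i + 1) (by omega) (by omega),
        PySem.List.pyRange_one_cons hin]
    simp

theorem special_function_spec : Claim_equal_special_function := by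
  intro n _
  unfold Spec_special_function special_function special_function_alt
  have h0 : pvF 0 = 1 := by decide
  have := loop_eq n (n - 0).toNat 0 (by omega) rfl []
  rw [h0] at this
  simpa only [pvF] using this
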